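-- pv_equiv track=rewrite | github.com/remarkeyable/Phasebook | phasebook/search.py | sort_results_by_priority
-- ===== SOURCE A (Python) =====
-- def sort_results_by_priority(results, args):
--     if 'id' in args:
--         id_value = args['id']
--         id_item = next((item for item in results if item['id'] == id_value), None)
--         results.remove(id_item)  # Remove the item to prevent duplication
--         sorted_results = [id_item] + sorted(
--             results,
--             key=lambda item: args['name'].lower() in item['name'].lower() if 'name' in args else True,
--             reverse=True
--         )
--     else:
--         sorted_results = sorted(
--             results,
--             key=lambda item: args['name'].lower() in item['name'].lower() if 'name' in args else True,
--             reverse=True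
--         )
--
--     return sorted_results
-- ===== SOURCE B (Python) =====
-- def sort_results_by_priority(results, args):
--     # Single-pass stable partition instead of sorting.
--     # Like A, removes the matching id item from `results` in place.
--     if 'id' in args:
--         id_value = args['id']
--         idx = next(i for i, item in enumerate(results) if item['id'] == id_value)
--         head = [results.pop(idx)]
--     else:
--         head = []
--     if 'name' in args:
--         needle = args['name'].lower()
--         match, rest = [], []
--         for item in results:
--             if needle in item['name'].lower():
--                 match.append(item)
--             else:
--                 rest.append(item)
--         return head + match + rest
--     return head + results
-- ===== Notes on version B (the rewrite author's own statement) =====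
-- stated objective: alternative
-- what changed: Replaces Python's sorted(..., key=<bool>, reverse=True) (and list.remove after a separate scan) with a single-pass stable partition into match/non-match groups and an index-based pop of the id item (same measured cost: timsort is adaptive).
import Mathlib
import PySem

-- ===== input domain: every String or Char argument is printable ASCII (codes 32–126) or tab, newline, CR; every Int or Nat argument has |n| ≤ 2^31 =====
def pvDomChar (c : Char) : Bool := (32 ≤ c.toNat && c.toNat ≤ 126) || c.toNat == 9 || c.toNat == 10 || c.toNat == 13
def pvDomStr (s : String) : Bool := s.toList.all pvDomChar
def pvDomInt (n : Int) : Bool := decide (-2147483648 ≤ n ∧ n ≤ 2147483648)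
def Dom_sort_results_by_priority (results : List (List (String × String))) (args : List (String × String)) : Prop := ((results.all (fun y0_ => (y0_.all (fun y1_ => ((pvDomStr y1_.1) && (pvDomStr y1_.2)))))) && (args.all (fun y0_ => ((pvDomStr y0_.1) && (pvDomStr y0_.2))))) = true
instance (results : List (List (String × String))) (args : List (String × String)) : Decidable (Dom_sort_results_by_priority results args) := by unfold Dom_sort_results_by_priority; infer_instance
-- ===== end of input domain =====

-- B replaces A's sorted(..., key=bool, reverse=True) by a single-pass stable partition (alternative algorithm, same measured cost).
-- Like A, both remove the matched id item from `results` in place; the equivalence proved is about the return value.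


-- ===== PORT A =====
-- the sort key lambda: args['name'].lower() in item['name'].lower() if 'name' in args else True
def pvKey (args : List (String × String)) (item : List (String × String)) : Bool :=
  match (PySem.Dict.mk args).get? "name" with
  | some n => PySem.Str.isIn (PySem.Str.lower n) (PySem.Str.lower ((PySem.Dict.mk item).getD "name" ""))
  | none => true

def sort_results_by_priority (results : List (List (String × String))) (args : List (String × String)) : List (List (String × String)) :=
  match (PySem.Dict.mk args).get? "id" with
  | some id_value =>
    -- id_item = next((item for item in results if item['id'] == id_value), None)
    match results.find? (fun item => (PySem.Dict.mk item).getD "id" "" == id_value) with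
    | some id_item =>
      -- results.remove(id_item)
      match PySem.List.remove? results id_item with
      | some rest => id_item :: PySem.List.sorted rest (pvKey args) true
      | none => []   -- unreachable: id_item ∈ results
    | none => []     -- Python raises ValueError (results.remove(None)); excluded by Pre_
  | none => PySem.List.sorted results (pvKey args) true

-- ===== PORT B =====
def sort_results_by_priority_alt (results : List (List (String × String))) (args : List (String × String)) : List (List (String × String)) :=
  let head_rest : List (List (String × String)) × List (List (String × String)) :=
    match (PySem.Dict.mk args).get? "id" with
    | some id_value =>
      match results.findIdx? (fun item => (PySem.Dict.mk item).getD "id" "" == id_value) with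
      | some i =>
        match PySem.List.pop? results (i : Int) with
        | some (it, rest) => ([it], rest)
        | none => ([], results)   -- unreachable: i < results.length
      | none => ([], results)     -- Python raises StopIteration; excluded by Pre_
    | none => ([], results)
  match (PySem.Dict.mk args).get? "name" with
  | some n =>
    let needle := PySem.Str.lower n
    let mr := head_rest.2.foldl
      (fun (acc : List (List (String × String)) × List (List (String × String))) item =>
        if PySem.Str.isIn needle (PySem.Str.lower ((PySem.Dict.mk item).getD "name" "")) then
          (acc.1 ++ [item], acc.2)
        else
          (acc.1, acc.2 ++ [item]))
      ([], [])
    head_rest.1 ++ mr.1 ++ mr.2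
  | none => head_rest.1 ++ head_rest.2

-- ===== PRECONDITION & SPEC =====
-- Pre_ excludes exactly the record shapes on which A raises: when args has 'id', some result must carry that id
-- (else results.remove(None) → ValueError) and every item needs an 'id' key; when args has 'name', every item needs
-- a 'name' key (KeyError in the sort key otherwise).  Requiring 'id' of items AFTER the first match too is slightly
-- narrower than A's exact raise set (A stops reading 'id' at the first match); that is the natural record shape.
def Pre_sort_results_by_priority (results : List (List (String × String))) (args : List (String × String)) : Prop :=
  (∀ v, (PySem.Dict.mk args).get? "id" = some v →
    (∀ item ∈ results, (PySem.Dict.mk item).contains "id" = true) ∧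
    ∃ item ∈ results, (PySem.Dict.mk item).get? "id" = some v) ∧
  ((PySem.Dict.mk args).contains "name" = true →
    ∀ item ∈ results, (PySem.Dict.mk item).contains "name" = true)
instance (results : List (List (String × String))) (args : List (String × String)) : Decidable (Pre_sort_results_by_priority results args) := by unfold Pre_sort_results_by_priority; infer_instance

def pvWitness_sort_results_by_priority : (List (List (String × String))) × (List (String × String)) :=
  ([[("id", "1"), ("name", "Bob")], [("id", "2"), ("name", "Ann")]], [("id", "2"), ("name", "an")])

def Spec_sort_results_by_priority (results : List (List (String × String))) (args : List (String × String)) (out : List (List (String × String))) : Prop := out = sort_results_by_priority_alt results args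
instance (results : List (List (String × String))) (args : List (String × String)) (out : List (List (String × String))) : Decidable (Spec_sort_results_by_priority results args out) := by unfold Spec_sort_results_by_priority; infer_instance

-- ===== CLAIM (what is proved, stated in full; the proofs are below) =====
def Claim_equal_sort_results_by_priority : Prop := ∀ (results : List (List (String × String))) (args : List (String × String)), Dom_sort_results_by_priority results args → Pre_sort_results_by_priority results args → Spec_sort_results_by_priority results args (sort_results_by_priority results args)

-- ===== LEMMAS AND PROOFS =====

-- inserting into T ++ F (all of T key-true, all of F key-false) with A's reverse comparator
theorem pv_insertBy_partition {α : Type} (k : α → Bool) (x : α) (T F : List α)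
    (hT : ∀ y ∈ T, k y = true) (hF : ∀ y ∈ F, k y = false) :
    PySem.List.insertBy (fun a b => decide (k b < k a)) x (T ++ F) =
      if k x then T ++ x :: F else (T ++ F) ++ [x] := by
  by_cases hx : k x = true
  · simp only [hx, if_pos]
    induction T with
    | nil =>
      cases F with
      | nil => simp [PySem.List.insertBy]
      | cons f F' =>
        have := hF f (by simp)
        simp [PySem.List.insertBy, this, hx]
    | cons t T' ih =>
      have ht := hT t (by simp)
      simp [PySem.List.insertBy, ht, hx, ih (fun y hy => hT y (by simp [hy])) ]
  · have hx' : k x = false := by simpa using hx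
    rw [PySem.List.insertBy_of_forall_not_before]
    · simp [hx']
    · intro y hy
      rcases List.mem_append.1 hy with h | h
      · simp [hT y h, hx']
      · simp [hF y h, hx']

-- the foldl of A's reverse insertion sort, on a partitioned accumulator, is a stable partition
theorem pv_foldl_insertBy_partition {α : Type} (k : α → Bool) (xs T F : List α)
    (hT : ∀ y ∈ T, k y = true) (hF : ∀ y ∈ F, k y = false) :
    xs.foldl (fun acc x => PySem.List.insertBy (fun a b => decide (k b < k a)) x acc) (T ++ F) =
      (T ++ xs.filter k) ++ (F ++ xs.filter (fun x => !k x)) := by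
  induction xs generalizing T F with
  | nil => simp
  | cons x xs ih =>
    simp only [List.foldl_cons]
    rw [pv_insertBy_partition k x T F hT hF]
    by_cases hx : k x = true
    · rw [if_pos hx]
      have hsh : T ++ x :: F = (T ++ [x]) ++ F := by simp
      have hT' : ∀ y ∈ T ++ [x], k y = true := by
        intro y hy
        rcases List.mem_append.1 hy with h | h
        · exact hT y h
        · simp at h; subst h; exact hx
      rw [hsh, ih (T ++ [x]) F hT' hF]
      simp [hx]
    · have hx' : k x = false := by simpa using hx
      rw [if_neg (by simp [hx'])]
      have hF' : ∀ y ∈ F ++ [x], k y = false := by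
        intro y hy
        rcases List.mem_append.1 hy with h | h
        · exact hF y h
        · simp at h; subst h; exact hx'
      rw [List.append_assoc, ih T (F ++ [x]) hT hF']
      simp [hx']

-- Python's sorted(xs, key=<Bool>, reverse=True) IS the stable partition
theorem pv_sorted_rev_bool {α : Type} (k : α → Bool) (xs : List α) :
    PySem.List.sorted xs k true = xs.filter k ++ xs.filter (fun x => !k x) := by
  rw [PySem.List.sorted_rev_eq_foldl_insertBy]
  simpa using pv_foldl_insertBy_partition k xs [] [] (by simp) (by simp)

-- B's partition loop computes the two filters
theorem pv_foldl_partition {α : Type} (p : α → Bool) (xs A B : List α) :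
    xs.foldl (fun (acc : List α × List α) x =>
        if p x then (acc.1 ++ [x], acc.2) else (acc.1, acc.2 ++ [x])) (A, B) =
      (A ++ xs.filter p, B ++ xs.filter (fun x => !p x)) := by
  induction xs generalizing A B with
  | nil => simp
  | cons x xs ih =>
    by_cases hx : p x = true
    · simp [List.foldl_cons, hx, ih]
    · have hx' : p x = false := by simpa using hx
      simp [List.foldl_cons, hx', ih]

-- erasing the FIRST element satisfying p (no earlier one equals it) = eraseIdx at its index
theorem pv_erase_first_match {α : Type} [BEq α] [LawfulBEq α] (p : α → Bool) :
    ∀ (xs : List α) (i : Nat) (h : i < xs.length),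
    (∀ j, (hj : j < i) → p (xs[j]'(by omega)) = false) → p (xs[i]'h) = true →
    xs.erase (xs[i]'h) = xs.eraseIdx i := by
  intro xs
  induction xs with
  | nil => intro i h; simp at h
  | cons x xs ih =>
    intro i h hbefore hi
    cases i with
    | zero => simp
    | succ n =>
      have hx : x ≠ (xs[n]'(by simpa using h)) := by
        intro he
        have := hbefore 0 (by omega)
        simp at this
        rw [he] at this
        simp at hi
        rw [hi] at this
        exact absurd this (by simp)
      simp only [List.getElem_cons_succ] at hi ⊢
      rw [List.erase_cons_tail (by simpa using fun h' => hx h')]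
      rw [ih n (by simpa using h) (fun j hj => by simpa using hbefore (j+1) (by omega)) hi]
      simp [List.eraseIdx]

-- A's key under a known 'name' argument
theorem pv_key_some (args : List (String × String)) (n : String)
    (h : (PySem.Dict.mk args).get? "name" = some n) :
    pvKey args = fun item =>
      PySem.Str.isIn (PySem.Str.lower n) (PySem.Str.lower ((PySem.Dict.mk item).getD "name" "")) := by
  funext item; simp [pvKey, h]

theorem pv_key_none (args : List (String × String))
    (h : (PySem.Dict.mk args).get? "name" = none) :
    pvKey args = fun _ => true := by
  funext item; simp [pvKey, h]

-- ===== VERDICT (by name: the statement is the Claim_ definition above) =====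
theorem sort_results_by_priority_spec : Claim_equal_sort_results_by_priority := by
  intro results args _ hpre
  obtain ⟨hid, hname⟩ := hpre
  unfold Spec_sort_results_by_priority sort_results_by_priority sort_results_by_priority_alt
  have tail_eq : ∀ rest : List (List (String × String)),
      PySem.List.sorted rest (pvKey args) true =
        (match (PySem.Dict.mk args).get? "name" with
         | some n =>
           rest.filter (fun item => PySem.Str.isIn (PySem.Str.lower n)
               (PySem.Str.lower ((PySem.Dict.mk item).getD "name" ""))) ++
           rest.filter (fun item => !PySem.Str.isIn (PySem.Str.lower n)
               (PySem.Str.lower ((PySem.Dict.mk item).getD "name" "")))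
         | none => rest) := by
    intro rest
    cases hargn : (PySem.Dict.mk args).get? "name" with
    | none => rw [pv_key_none args hargn, pv_sorted_rev_bool]; simp
    | some n => rw [pv_key_some args n hargn, pv_sorted_rev_bool]
  cases hargid : (PySem.Dict.mk args).get? "id" with
  | none =>
    simp only [tail_eq]
    cases hargn : (PySem.Dict.mk args).get? "name" with
    | none => simp
    | some n => simp [pv_foldl_partition]
  | some idv =>
    obtain ⟨hall, it0, hmem0, hit0⟩ := hid idv hargid
    set p : List (String × String) → Bool :=
      fun item => ((PySem.Dict.mk item).getD "id" "" == idv) with hp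
    have hp0 : p it0 = true := by
      rw [hp]; simp [PySem.Dict.getD_eq_get?_getD, hit0]
    have hsome : (results.findIdx? p).isSome := by
      rw [List.findIdx?_isSome, List.any_eq_true]
      exact ⟨it0, hmem0, hp0⟩
    obtain ⟨i, hi⟩ := Option.isSome_iff_exists.1 hsome
    obtain ⟨hlen, hpi, hbefore⟩ := List.findIdx?_eq_some_iff_getElem.1 hi
    have hfind : results.find? p = some (results[i]'hlen) := by
      rw [List.find?_eq_some_iff_getElem]
      exact ⟨hpi, i, hlen, rfl, fun j hj => by simp [hbefore j hj]⟩
    have hpop : PySem.List.pop? results (i : Int) = some (results[i]'hlen, results.eraseIdx i) :=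
      PySem.List.pop?_natCast results i hlen
    have hremove : PySem.List.remove? results (results[i]'hlen) = some (results.eraseIdx i) := by
      rw [PySem.List.remove?_eq_some_erase results _ (List.getElem_mem hlen),
        pv_erase_first_match p results i hlen (fun j hj => by simpa using hbefore j hj) hpi]
    simp only [← hp]
    simp only [hfind, hi, hremove, hpop, tail_eq]
    cases hargn : (PySem.Dict.mk args).get? "name" with
    | none => simp
    | some n => simp [pv_foldl_partition]
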